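-- pv_equiv track=rewrite | github.com/admercs/AdventOfCode | 2023/problem_01/python/main.py | line_sum
-- ===== SOURCE A (Python) =====
-- def line_sum(line:str) -> int:
--     # variables
--     char:char = '0'
--     left:int  = 0
--     right:int = 0
--     summ:int  = 0
--     # loop over chars from left, then right
--     for i in range(0, len(line), 1):
--         char = line[i]
--         if char.isdigit():
--             left = int(char)
--             for j in range(len(line)-1, i-1, -1):
--                 char = line[j]
--                 if char.isdigit():
--                     right = int(char)
--                     summ = left + right
--                     return summ
--     return 0
-- ===== SOURCE B (Python) =====
-- def line_sum(line: str) -> int: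
--     digits = [int(c) for c in line if c.isdigit()]
--     return digits[0] + digits[-1] if digits else 0
-- ===== Notes on version B (the rewrite author's own statement) =====
-- stated objective: simpler
-- what changed: Replaces the outer left-scan with a nested right-scan (and early return) by one pass collecting all digits, then O(1) indexing of the first and last.
import Mathlib
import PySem

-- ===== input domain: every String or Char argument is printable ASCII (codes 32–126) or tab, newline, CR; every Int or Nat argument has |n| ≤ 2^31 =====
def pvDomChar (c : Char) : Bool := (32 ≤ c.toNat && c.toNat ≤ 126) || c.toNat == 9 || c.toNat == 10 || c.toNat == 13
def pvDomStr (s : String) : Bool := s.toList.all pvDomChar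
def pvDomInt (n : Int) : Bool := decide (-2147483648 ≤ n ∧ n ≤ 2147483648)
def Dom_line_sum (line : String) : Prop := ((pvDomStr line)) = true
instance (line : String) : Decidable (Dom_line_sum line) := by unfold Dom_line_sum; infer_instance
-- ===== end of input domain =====

-- B collects all digits in one pass and adds the first and last; A's outer scan with a nested right-to-left scan is replaced (objective: simpler).


-- int(c) for a single digit character c — exact for '0'..'9' (the only place it is applied)
def pvVal (c : Char) : Int := (c.toNat : Int) - 48

-- ===== PORT A =====
-- inner loop: for j in range(len(line)-1, i-1, -1): … return summ  (some = early return, none = loop fell through)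
def pvInner (cs : List Char) (left : Int) : List Int → Option Int
  | [] => none
  | j :: js =>
    let char := PySem.List.pyGetD cs j ' '
    if PySem.Chars.isdigit char then some (left + pvVal char) else pvInner cs left js

-- outer loop: for i in range(0, len(line), 1)
def pvOuter (cs : List Char) : List Int → Int
  | [] => 0
  | i :: is =>
    let char := PySem.List.pyGetD cs i ' '
    if PySem.Chars.isdigit char then
      match pvInner cs (pvVal char) (PySem.List.pyRange ((cs.length : Int) - 1) (i - 1) (-1)) with
      | some summ => summ
      | none => pvOuter cs is
    else pvOuter cs is

def line_sum (line : String) : Int :=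
  pvOuter line.toList (PySem.List.pyRange 0 (line.toList.length : Int) 1)

-- ===== PORT B =====
def line_sum_alt (line : String) : Int :=
  let digits := (line.toList.filter PySem.Chars.isdigit).map pvVal
  if digits.isEmpty then 0
  else PySem.List.pyGetD digits 0 0 + PySem.List.pyGetD digits (-1) 0

-- ===== PRECONDITION & SPEC =====
def Spec_line_sum (line : String) (out : Int) : Prop := out = line_sum_alt line
instance (line : String) (out : Int) : Decidable (Spec_line_sum line out) := by unfold Spec_line_sum; infer_instance

-- ===== CLAIM (what is proved, stated in full; the proofs are below) =====
def Claim_equal_line_sum : Prop := ∀ (line : String), Dom_line_sum line → Spec_line_sum line (line_sum line)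

-- ===== LEMMAS AND PROOFS =====

-- common value of both programs: first digit + last digit, 0 if none
def pvF (l : List Char) : Int :=
  match l.filter PySem.Chars.isdigit with
  | [] => 0
  | d :: rest => pvVal d + pvVal (rest.getLastD d)

lemma pvInner_spec (cs : List Char) (left : Int) (js : List Int) :
    pvInner cs left js =
      ((js.map (fun j => PySem.List.pyGetD cs j ' ')).filter PySem.Chars.isdigit).head?.map
        (fun c => left + pvVal c) := by
  induction js with
  | nil => rfl
  | cons j js ih =>
    simp only [pvInner, List.map_cons, List.filter_cons]
    by_cases h : PySem.Chars.isdigit (PySem.List.pyGetD cs j ' ')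
    · simp [h]
    · simp [h, ih]

lemma pvOuter_spec (cs : List Char) (k : Nat) :
    pvOuter cs (PySem.List.pyRange (k : Int) (cs.length : Int) 1) = pvF (cs.drop k) := by
  induction hfuel : cs.length - k generalizing k with
  | zero =>
    have hk : cs.length ≤ k := by omega
    rw [PySem.List.pyRange_one_eq_nil (by exact_mod_cast hk)]
    simp [pvOuter, pvF, List.drop_eq_nil_of_le hk]
  | succ m ih =>
    have hk : k < cs.length := by omega
    rw [PySem.List.pyRange_one_cons (by exact_mod_cast hk)]
    have hdrop : cs.drop k = cs[k] :: cs.drop (k + 1) := List.drop_eq_getElem_cons hk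
    have hget : PySem.List.pyGetD cs (k : Int) ' ' = cs[k] := by
      rw [PySem.List.pyGetD_natCast]; exact List.getD_eq_getElem cs ' ' hk
    simp only [pvOuter, hget]
    by_cases hd : PySem.Chars.isdigit cs[k]
    · -- inner loop range(n-1, k-1, -1) is the reverse of range(k, n)
      have hrange : PySem.List.pyRange ((cs.length : Int) - 1) ((k : Int) - 1) (-1)
          = (PySem.List.pyRange (k : Int) (cs.length : Int) 1).reverse := by
        rw [PySem.List.pyRange_neg_one_eq_reverse]
        norm_num
      have hmap : (PySem.List.pyRange (k : Int) (cs.length : Int) 1).map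
          (fun j => PySem.List.pyGetD cs j ' ') = cs.drop k := by
        have := PySem.List.map_pyGetD_pyRange' cs ' ' (a := (k : Int)) (by positivity)
        simpa using this
      rw [hrange, pvInner_spec, List.map_reverse, hmap, List.filter_reverse,
        List.head?_reverse, hdrop]
      simp only [List.filter_cons, hd, if_pos, pvF]
      have hlast : ∀ (x : Char) (l : List Char), (x :: l).getLast? = some (l.getLastD x) := by
        intro x l
        induction l generalizing x with
        | nil => rfl
        | cons y ys ih => rw [List.getLast?_cons_cons, ih, List.getLastD_cons]
      rw [hlast]
      simp
    · have hcast : ((k : Int) + 1) = ((k + 1 : Nat) : Int) := by push_cast; ring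
      rw [hcast, ih (k + 1) (by omega)]
      simp only [pvF, hdrop, List.filter_cons, hd]
      simp

lemma pvF_eq_alt (line : String) : line_sum_alt line = pvF line.toList := by
  unfold line_sum_alt pvF
  cases h : line.toList.filter PySem.Chars.isdigit with
  | nil => simp
  | cons d rest =>
    simp only [List.map_cons]
    have hne : pvVal d :: rest.map pvVal ≠ [] := by simp
    rw [if_neg (by simp), PySem.List.pyGetD_zero_cons,
      PySem.List.pyGetD_neg_one (pvVal d :: rest.map pvVal) 0 hne]
    simp [List.getLast_eq_getLastD]

-- ===== VERDICT (by name: the statement is the Claim_ definition above) =====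
theorem line_sum_spec : Claim_equal_line_sum := by
  intro line _
  unfold Spec_line_sum line_sum
  rw [pvF_eq_alt]
  have := pvOuter_spec line.toList 0
  simpa using this
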